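-- pv_equiv track=rewrite | github.com/adotzh/sutro-problems | matmul/exp_nonsquare.py | analyze_config
-- ===== SOURCE A (Python) =====
-- import sys, math
--
-- N = 16
--
-- def addr_cost(addr: int) -> int:
--     return math.isqrt(addr - 1) + 1
--
-- def analyze_config(Ti, Tj, Tk):
--     """Compute expected cost analytically."""
--     nbi = N // Ti
--     nbj = N // Tj
--     nbk = N // Tk
--
--     sA_base = 2
--     sB_base = sA_base + Ti * Tk
--     sC_base = sB_base + Tk * Tj
--
--     # Number of times each region is read
--     # sA: read Ti*Tk times per (ii,jj,kk) block = Ti*Tk reads per inner loop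
--     # Each (bi,bk) block's sA tile is shared across all bj
--     # sA load: nbi * nbj * nbk * Ti * Tk reads (one copy per element per block)
--     # sA use: nbi * nbj * nbk * Ti * Tj * Tk reads (one per inner iter, 2 reads: sA and sB)
--     # Actually sA is read once per (ii, kk, jj) = Ti*Tk*Tj times per block * nbi*nbj*nbk blocks
--
--     # Analytical: sA addr sA(ii,kk) is read Tj times per inner jj loop, once per (bi,bk,bj)
--     # total sA reads = nbi * nbj * nbk * Ti * Tk * Tj  ... but that's wrong
--     # The inner loop is: for ii in Ti: for jj in Tj: for kk in Tk:
--     # sA(ii,kk) is read once per (ii,jj,kk) => Ti*Tj*Tk times per (bi,bj,bk) block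
--     # Total sA reads = nbi * nbj * nbk * Ti * Tj * Tk (split per addr: Tj*Tk per addr ii)
--
--     # For each sA addr (ii fixed, kk fixed): read Tj*Tk times per (bi,bj,bk) block * nbi*nbj*nbk
--     # Actually: per (bi,bj,bk) block: for each ii, sA(ii,kk) is read Tj times (once per jj)
--     # per addr sA(ii,kk): Tj reads per block * nbi*nbj*nbk blocks
--
--     sA_reads_per_addr = nbj * nbk * nbi * Tj  # Wait, not quite
--     # Correction: per (bi,bj,bk) block, sA(ii,kk) is read Tj times (one for each jj)
--     # Total blocks = nbi * nbj * nbk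
--     # Total reads for sA(ii,kk) = Tj * nbi * nbj * nbk
--     sA_total = Ti * Tk * Tj * nbi * nbj * nbk  # total across all sA addrs
--
--     # sB(kk,jj) is read Ti times per block (one for each ii)
--     sB_total = Tk * Tj * Ti * nbi * nbj * nbk
--
--     # sC: read for add (not on first product which goes direct)
--     # For each (bi,bj): sC(ii,jj) is accumulated nbk*Tk - 1 times (minus first direct mul)
--     # Actually: nbk*Tk multiplications total, first one is direct (no sC read), rest are add+sC read
--     # So sC reads = (nbk * Tk - 1) reads per (ii,jj) per (bi,bj)
--     # Plus sC is read at end for output: Ti*Tj reads per (bi,bj)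
--     # Also reads of tmp: (nbk*Tk - 1) reads per (ii,jj) per (bi,bj)
--     n_sC_reads = (nbk * Tk - 1) * Ti * Tj * nbi * nbj  # from add instructions
--     n_sC_copy_reads = Ti * Tj * nbi * nbj  # copy to bulk C
--
--     # tmp reads
--     n_tmp_reads = (nbk * Tk - 1) * Ti * Tj * nbi * nbj  # from add instructions
--
--     sA_cost = sum(addr_cost(sA_base + ii * Tk + kk)
--                   for ii in range(Ti) for kk in range(Tk)) * nbj * nbk * nbi * Tj
--     # Wait: sA(ii,kk) is read Tj times per block, total nbi*nbj*nbk blocks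
--     # Fix the formula: sA_total = nbi * nbj * nbk, each sA(ii,kk) read Tj times per block
--     sA_cost_total = 0
--     for ii in range(Ti):
--         for kk in range(Tk):
--             addr = sA_base + ii * Tk + kk
--             sA_cost_total += addr_cost(addr) * Tj * nbi * nbj * nbk
--
--     sB_cost_total = 0
--     for kk in range(Tk):
--         for jj in range(Tj):
--             addr = sB_base + kk * Tj + jj
--             sB_cost_total += addr_cost(addr) * Ti * nbi * nbj * nbk
--
--     sC_cost_total = 0
--     for ii in range(Ti):
--         for jj in range(Tj):
--             addr = sC_base + ii * Tj + jj
--             # read (nbk*Tk - 1) times for accumulation + 1 for copy to bulk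
--             sC_cost_total += addr_cost(addr) * ((nbk * Tk - 1) + 1) * nbi * nbj
--
--     tmp_cost_total = addr_cost(1) * (nbk * Tk - 1) * Ti * Tj * nbi * nbj
--
--     return {
--         'sA_base': sA_base, 'sB_base': sB_base, 'sC_base': sC_base,
--         'scratch_size': Ti*Tk + Tk*Tj + Ti*Tj,
--         'sA_cost': sA_cost_total, 'sB_cost': sB_cost_total,
--         'sC_cost': sC_cost_total, 'tmp_cost': tmp_cost_total,
--         'estimated_total': sA_cost_total + sB_cost_total + sC_cost_total + tmp_cost_total
--     }
-- ===== SOURCE B (Python) =====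
-- import math
--
-- N = 16
--
-- def _S(n):
--     # closed-form sum of math.isqrt(t) for t in range(n)
--     if n <= 0:
--         return 0
--     s = math.isqrt(n - 1)
--     return s * n - s * (s + 1) * (2 * s + 1) // 6
--
-- def _region_cost(base, count):
--     # sum of (isqrt(addr-1)+1) over the contiguous addresses base..base+count-1
--     if count <= 0:
--         return 0
--     return count + _S(base + count - 1) - _S(base - 1)
--
-- def analyze_config(Ti, Tj, Tk):
--     """Compute expected cost analytically (closed-form over each address interval)."""
--     nbi = N // Ti
--     nbj = N // Tj
--     nbk = N // Tk
--
--     sA_base = 2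
--     sB_base = sA_base + Ti * Tk
--     sC_base = sB_base + Tk * Tj
--
--     # number of addresses actually touched in each scratch region (0 if a tile dim is empty)
--     mA = Ti * Tk if Ti > 0 and Tk > 0 else 0
--     mB = Tk * Tj if Tk > 0 and Tj > 0 else 0
--     mC = Ti * Tj if Ti > 0 and Tj > 0 else 0
--
--     sA_cost_total = _region_cost(sA_base, mA) * Tj * nbi * nbj * nbk
--     sB_cost_total = _region_cost(sB_base, mB) * Ti * nbi * nbj * nbk
--     sC_cost_total = _region_cost(sC_base, mC) * (nbk * Tk) * nbi * nbj
--     tmp_cost_total = (nbk * Tk - 1) * Ti * Tj * nbi * nbj  # addr_cost(1) == 1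
--
--     return {
--         'sA_base': sA_base, 'sB_base': sB_base, 'sC_base': sC_base,
--         'scratch_size': Ti*Tk + Tk*Tj + Ti*Tj,
--         'sA_cost': sA_cost_total, 'sB_cost': sB_cost_total,
--         'sC_cost': sC_cost_total, 'tmp_cost': tmp_cost_total,
--         'estimated_total': sA_cost_total + sB_cost_total + sC_cost_total + tmp_cost_total
--     }
-- ===== Notes on version B (the rewrite author's own statement) =====
-- stated objective: faster
-- what changed: B replaces A's per-address nested loops over each scratch region by a closed-form evaluation: each region is a contiguous address interval, and the sum of isqrt(addr-1)+1 over an interval is computed from the closed form sum_{t<n} isqrt(t) = s*n - s(s+1)(2s+1)/6 with s = isqrt(n-1), so each region costs O(1) big-int operations instead of one isqrt per address.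
import Mathlib
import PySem

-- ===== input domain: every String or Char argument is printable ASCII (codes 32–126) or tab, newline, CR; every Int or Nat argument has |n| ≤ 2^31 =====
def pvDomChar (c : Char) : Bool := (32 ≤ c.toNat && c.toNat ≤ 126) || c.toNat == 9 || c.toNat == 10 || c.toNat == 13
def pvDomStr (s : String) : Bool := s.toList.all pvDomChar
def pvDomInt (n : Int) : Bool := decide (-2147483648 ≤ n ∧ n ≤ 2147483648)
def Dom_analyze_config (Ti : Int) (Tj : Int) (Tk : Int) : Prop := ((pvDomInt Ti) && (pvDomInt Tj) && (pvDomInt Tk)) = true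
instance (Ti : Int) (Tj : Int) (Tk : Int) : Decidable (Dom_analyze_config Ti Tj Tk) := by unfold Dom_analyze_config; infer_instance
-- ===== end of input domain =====

-- B replaces A's per-address loops by a closed-form sum of floor-sqrt over each
-- contiguous scratch address interval (objective: faster, asymptotic).


-- ===== PORT A =====
-- math.isqrt(addr - 1) + 1; Int.sqrt agrees with math.isqrt on nonnegative
-- arguments, and Pre_ guarantees every evaluated addr has addr ≥ 1
-- (Python raises ValueError otherwise).
def pv_addr_cost (addr : Int) : Int := Int.sqrt (addr - 1) + 1

def analyze_config (Ti : Int) (Tj : Int) (Tk : Int) : List (String × Int) :=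
  let nbi := PySem.Int.floordiv 16 Ti
  let nbj := PySem.Int.floordiv 16 Tj
  let nbk := PySem.Int.floordiv 16 Tk
  let sA_base : Int := 2
  let sB_base := sA_base + Ti * Tk
  let sC_base := sB_base + Tk * Tj
  let _sA_reads_per_addr := nbj * nbk * nbi * Tj
  let _sA_total := Ti * Tk * Tj * nbi * nbj * nbk
  let _sB_total := Tk * Tj * Ti * nbi * nbj * nbk
  let _n_sC_reads := (nbk * Tk - 1) * Ti * Tj * nbi * nbj
  let _n_sC_copy_reads := Ti * Tj * nbi * nbj
  let _n_tmp_reads := (nbk * Tk - 1) * Ti * Tj * nbi * nbj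
  let _sA_cost := ((PySem.List.pyRange 0 Ti).foldl (fun acc ii =>
      (PySem.List.pyRange 0 Tk).foldl (fun acc kk =>
        acc + pv_addr_cost (sA_base + ii * Tk + kk)) acc) 0) * nbj * nbk * nbi * Tj
  let sA_cost_total := (PySem.List.pyRange 0 Ti).foldl (fun acc ii =>
      (PySem.List.pyRange 0 Tk).foldl (fun acc kk =>
        acc + pv_addr_cost (sA_base + ii * Tk + kk) * Tj * nbi * nbj * nbk) acc) 0
  let sB_cost_total := (PySem.List.pyRange 0 Tk).foldl (fun acc kk =>
      (PySem.List.pyRange 0 Tj).foldl (fun acc jj =>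
        acc + pv_addr_cost (sB_base + kk * Tj + jj) * Ti * nbi * nbj * nbk) acc) 0
  let sC_cost_total := (PySem.List.pyRange 0 Ti).foldl (fun acc ii =>
      (PySem.List.pyRange 0 Tj).foldl (fun acc jj =>
        acc + pv_addr_cost (sC_base + ii * Tj + jj) * ((nbk * Tk - 1) + 1) * nbi * nbj) acc) 0
  let tmp_cost_total := pv_addr_cost 1 * (nbk * Tk - 1) * Ti * Tj * nbi * nbj
  [("sA_base", sA_base), ("sB_base", sB_base), ("sC_base", sC_base),
   ("scratch_size", Ti * Tk + Tk * Tj + Ti * Tj),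
   ("sA_cost", sA_cost_total), ("sB_cost", sB_cost_total),
   ("sC_cost", sC_cost_total), ("tmp_cost", tmp_cost_total),
   ("estimated_total", sA_cost_total + sB_cost_total + sC_cost_total + tmp_cost_total)]

-- ===== PORT B =====
-- closed-form sum of math.isqrt(t) for t in range(n)
def pv_S (n : Int) : Int :=
  if n ≤ 0 then 0
  else
    let s := Int.sqrt (n - 1)
    s * n - PySem.Int.floordiv (s * (s + 1) * (2 * s + 1)) 6

-- sum of (isqrt(addr-1)+1) over the contiguous addresses base..base+count-1
def pv_region_cost (base : Int) (count : Int) : Int :=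
  if count ≤ 0 then 0 else count + pv_S (base + count - 1) - pv_S (base - 1)

def analyze_config_alt (Ti : Int) (Tj : Int) (Tk : Int) : List (String × Int) :=
  let nbi := PySem.Int.floordiv 16 Ti
  let nbj := PySem.Int.floordiv 16 Tj
  let nbk := PySem.Int.floordiv 16 Tk
  let sA_base : Int := 2
  let sB_base := sA_base + Ti * Tk
  let sC_base := sB_base + Tk * Tj
  let mA := if 0 < Ti ∧ 0 < Tk then Ti * Tk else 0
  let mB := if 0 < Tk ∧ 0 < Tj then Tk * Tj else 0
  let mC := if 0 < Ti ∧ 0 < Tj then Ti * Tj else 0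
  let sA_cost_total := pv_region_cost sA_base mA * Tj * nbi * nbj * nbk
  let sB_cost_total := pv_region_cost sB_base mB * Ti * nbi * nbj * nbk
  let sC_cost_total := pv_region_cost sC_base mC * (nbk * Tk) * nbi * nbj
  let tmp_cost_total := (nbk * Tk - 1) * Ti * Tj * nbi * nbj
  [("sA_base", sA_base), ("sB_base", sB_base), ("sC_base", sC_base),
   ("scratch_size", Ti * Tk + Tk * Tj + Ti * Tj),
   ("sA_cost", sA_cost_total), ("sB_cost", sB_cost_total),
   ("sC_cost", sC_cost_total), ("tmp_cost", tmp_cost_total),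
   ("estimated_total", sA_cost_total + sB_cost_total + sC_cost_total + tmp_cost_total)]

-- ===== PRECONDITION & SPEC =====
-- Pre_ excludes exactly the inputs where Python A raises: a zero tile size
-- (ZeroDivisionError in N // T) or a touched scratch address below 1
-- (math.isqrt of a negative number, ValueError).
def Pre_analyze_config (Ti : Int) (Tj : Int) (Tk : Int) : Prop :=
  Ti ≠ 0 ∧ Tj ≠ 0 ∧ Tk ≠ 0 ∧
  (0 < Tk → 0 < Tj → 1 ≤ 2 + Ti * Tk) ∧
  (0 < Ti → 0 < Tj → 1 ≤ 2 + Ti * Tk + Tk * Tj)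
instance (Ti : Int) (Tj : Int) (Tk : Int) : Decidable (Pre_analyze_config Ti Tj Tk) := by unfold Pre_analyze_config; infer_instance
def pvWitness_analyze_config : Int × Int × Int := (4, 4, 4)

def Spec_analyze_config (Ti : Int) (Tj : Int) (Tk : Int) (out : List (String × Int)) : Prop := out = analyze_config_alt Ti Tj Tk
instance (Ti : Int) (Tj : Int) (Tk : Int) (out : List (String × Int)) : Decidable (Spec_analyze_config Ti Tj Tk out) := by unfold Spec_analyze_config; infer_instance

-- ===== CLAIM (what is proved, stated in full; the proofs are below) =====
def Claim_equal_analyze_config : Prop := ∀ (Ti : Int) (Tj : Int) (Tk : Int), Dom_analyze_config Ti Tj Tk → Pre_analyze_config Ti Tj Tk → Spec_analyze_config Ti Tj Tk (analyze_config Ti Tj Tk)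

-- ===== LEMMAS AND PROOFS =====

-- sum of Nat.sqrt over List.range
def pv_sumSqrt (n : Nat) : Int := ((List.range n).map (fun t => (Nat.sqrt t : Int))).sum

lemma pv_sqrt_pred_of_ne (n : Nat) (h : 0 < n) (hne : Nat.sqrt n * Nat.sqrt n ≠ n) :
    Nat.sqrt (n - 1) = Nat.sqrt n := by
  have h1 : Nat.sqrt n * Nat.sqrt n ≤ n := by simpa [pow_two] using Nat.sqrt_le' n
  have h2 : Nat.sqrt n ≤ Nat.sqrt (n - 1) := by
    apply Nat.le_sqrt.mpr
    exact Nat.le_pred_of_lt (lt_of_le_of_ne h1 hne)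
  have h3 : Nat.sqrt (n - 1) ≤ Nat.sqrt n := Nat.sqrt_le_sqrt (by omega)
  omega

lemma pv_sqrt_pred_of_sq (n : Nat) (h : 0 < n) (heq : Nat.sqrt n * Nat.sqrt n = n) :
    Nat.sqrt (n - 1) + 1 = Nat.sqrt n := by
  have hs1 : 1 ≤ Nat.sqrt n := by
    rcases Nat.eq_zero_or_pos (Nat.sqrt n) with h0 | h0
    · rw [h0] at heq; omega
    · exact h0
  have hlt : Nat.sqrt (n - 1) < Nat.sqrt n := by
    rw [Nat.sqrt_lt, heq]
    omega
  
  obtain ⟨t, ht⟩ : ∃ t, Nat.sqrt n = t + 1 := ⟨Nat.sqrt n - 1, by omega⟩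
  rw [ht] at heq
  have hlt2 : t * t < n := by nlinarith [heq]
  have hge : t ≤ Nat.sqrt (n - 1) := Nat.le_sqrt.mpr (Nat.le_pred_of_lt hlt2)
  omega

lemma pv_six_sumSqrt (n : Nat) :
    6 * pv_sumSqrt n =
      6 * (Nat.sqrt (n - 1) : Int) * n -
        (Nat.sqrt (n - 1) : Int) * ((Nat.sqrt (n - 1) : Int) + 1) * (2 * (Nat.sqrt (n - 1) : Int) + 1) := by
  induction n with
  | zero => simp [pv_sumSqrt]
  | succ n ih =>
    have hstep : pv_sumSqrt (n + 1) = pv_sumSqrt n + (Nat.sqrt n : Int) := by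
      simp [pv_sumSqrt, List.range_succ]
    rcases Nat.eq_zero_or_pos n with h0 | hpos
    · subst h0; simp [pv_sumSqrt]
    · by_cases hsq : Nat.sqrt n * Nat.sqrt n = n
      · have hp := pv_sqrt_pred_of_sq n hpos hsq
        have hp' : ((Nat.sqrt (n - 1) : Int)) = (Nat.sqrt n : Int) - 1 := by omega
        have hn : ((n : Int)) = (Nat.sqrt n : Int) * (Nat.sqrt n : Int) := by exact_mod_cast hsq.symm
        rw [hstep]
        simp only [Nat.add_sub_cancel]
        rw [hp'] at ih
        push_cast at ih ⊢
        nlinarith [ih, hn]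
      · have hp := pv_sqrt_pred_of_ne n hpos hsq
        rw [hstep]
        simp only [Nat.add_sub_cancel]
        rw [hp] at ih
        push_cast at ih ⊢
        linarith [ih]

lemma pv_S_eq (n : Nat) : pv_S (n : Int) = pv_sumSqrt n := by
  rcases Nat.eq_zero_or_pos n with h0 | hpos
  · subst h0; simp [pv_S, pv_sumSqrt]
  · have hn1 : ((n : Int)) - 1 = ((n - 1 : Nat) : Int) := by omega
    have hs : Int.sqrt ((n : Int) - 1) = (Nat.sqrt (n - 1) : Int) := by
      rw [hn1, Int.sqrt_natCast]
    have h6 := pv_six_sumSqrt n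
    set s : Int := (Nat.sqrt (n - 1) : Int) with hsdef
    have hdiv : s * (s + 1) * (2 * s + 1) = 6 * (s * n - pv_sumSqrt n) := by ring_nf; ring_nf at h6; omega
    have : PySem.Int.floordiv (s * (s + 1) * (2 * s + 1)) 6 = s * n - pv_sumSqrt n := by
      rw [PySem.Int.floordiv_eq_ediv_of_pos (by norm_num), hdiv]
      exact Int.mul_ediv_cancel_left _ (by norm_num)
    simp only [pv_S]
    rw [if_neg (by exact_mod_cast Nat.not_le.mpr hpos : ¬ ((n : Int) ≤ 0))]
    simp only [hs]
    rw [this]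
    ring

-- flatten a nested index sum into a sum over one contiguous range
lemma pv_flatten (f : Nat → Int) (i k : Nat) :
    ((List.range i).map (fun ii => ((List.range k).map (fun kk => f (ii * k + kk))).sum)).sum
      = ((List.range (i * k)).map f).sum := by
  induction i with
  | zero => simp
  | succ i ih =>
    rw [List.range_succ, List.map_append, List.sum_append, ih]
    have : (i + 1) * k = i * k + k := by ring
    rw [this, List.range_add, List.map_append, List.sum_append]
    simp [List.map_map, Function.comp_def]

lemma pv_sum_region (base : Int) (hb : 1 ≤ base) (m : Nat) :
    ((List.range m).map (fun t : Nat => pv_addr_cost (base + (t : Int)))).sum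
      = pv_region_cost base (m : Int) := by
  have hb0 : base - 1 = ((base - 1).toNat : Int) := by omega
  set b0 : Nat := (base - 1).toNat with hb0def
  have hterm : ∀ t : Nat, pv_addr_cost (base + (t : Int)) = (Nat.sqrt (b0 + t) : Int) + 1 := by
    intro t
    simp only [pv_addr_cost]
    have : base + (t : Int) - 1 = ((b0 + t : Nat) : Int) := by push_cast; omega
    rw [this, Int.sqrt_natCast]
  rcases Nat.eq_zero_or_pos m with h0 | hpos
  · subst h0; simp [pv_region_cost]
  · have hsum : ((List.range m).map (fun t : Nat => pv_addr_cost (base + (t : Int)))).sum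
        = (m : Int) + (pv_sumSqrt (b0 + m) - pv_sumSqrt b0) := by
      have h1 : ((List.range m).map (fun t : Nat => pv_addr_cost (base + (t : Int)))).sum
          = ((List.range m).map (fun t : Nat => (Nat.sqrt (b0 + t) : Int) + 1)).sum := by
        exact congrArg List.sum (List.map_congr_left (fun t _ => hterm t))
      rw [h1]
      have h2 : pv_sumSqrt (b0 + m) = pv_sumSqrt b0 + ((List.range m).map (fun t : Nat => (Nat.sqrt (b0 + t) : Int))).sum := by
        simp [pv_sumSqrt, List.range_add, List.map_map, Function.comp_def]
      have h3 : ((List.range m).map (fun t : Nat => (Nat.sqrt (b0 + t) : Int) + 1)).sum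
          = ((List.range m).map (fun t : Nat => (Nat.sqrt (b0 + t) : Int))).sum + (m : Int) := by
        rw [PySem.List.sum_map_add_int (List.range m) (fun t : Nat => (Nat.sqrt (b0 + t) : Int)) (fun _ => 1),
            PySem.List.sum_map_const_int]
        simp
      omega
    rw [hsum]
    have hmpos : ¬ ((m : Int) ≤ 0) := by exact_mod_cast Nat.not_le.mpr hpos
    simp only [pv_region_cost, if_neg hmpos]
    have e1 : base + (m : Int) - 1 = ((b0 + m : Nat) : Int) := by push_cast; omega
    have e2 : base - 1 = (b0 : Int) := hb0
    rw [e1, e2, pv_S_eq, pv_S_eq]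
    ring

lemma pv_pyRange_nonpos (I : Int) (h : I ≤ 0) : PySem.List.pyRange 0 I = [] := by
  simp [PySem.List.pyRange]
  omega

-- a double loop of A over one scratch region equals B's closed-form region cost
lemma pv_region_eq (base C : Int) (I K : Int) (hb : 0 < I → 0 < K → 1 ≤ base) :
    (PySem.List.pyRange 0 I).foldl (fun acc i =>
        (PySem.List.pyRange 0 K).foldl (fun acc k => acc + pv_addr_cost (base + i * K + k) * C) acc) 0
      = pv_region_cost base (if 0 < I ∧ 0 < K then I * K else 0) * C := by
  by_cases hI : 0 < I
  · by_cases hK : 0 < K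
    · have hbase := hb hI hK
      obtain ⟨i, rfl⟩ : ∃ m : Nat, I = (m : Int) := ⟨I.toNat, by omega⟩
      obtain ⟨k, rfl⟩ : ∃ m : Nat, K = (m : Int) := ⟨K.toNat, by omega⟩
      rw [if_pos ⟨hI, hK⟩, PySem.List.pyRange_zero_natCast, PySem.List.pyRange_zero_natCast]
      simp only [PySem.List.foldl_add, zero_add, List.map_map, Function.comp_def]
      have hterm : ∀ ii kk : Nat,
          pv_addr_cost (base + (ii : Int) * (k : Int) + (kk : Int)) * C
            = pv_addr_cost (base + ((ii * k + kk : Nat) : Int)) * C := by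
        intro ii kk; congr 2; push_cast; ring
      simp only [hterm, List.sum_map_mul_right]
      have hm : ((i : Int)) * (k : Int) = ((i * k : Nat) : Int) := by push_cast; ring
      rw [hm]
      congr 1
      rw [pv_flatten (fun t => pv_addr_cost (base + (t : Int))) i k]
      exact pv_sum_region base hbase (i * k)
    · rw [if_neg (by tauto)]
      rw [pv_pyRange_nonpos K (by omega)]
      simp [pv_region_cost, List.foldl]
  · rw [if_neg (by tauto), pv_pyRange_nonpos I (by omega)]
    simp [pv_region_cost]

-- the same with A's chain of four (resp. three) constant factors
lemma pv_region_eq4 (base C1 C2 C3 C4 : Int) (I K : Int) (hb : 0 < I → 0 < K → 1 ≤ base) :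
    (PySem.List.pyRange 0 I).foldl (fun acc i =>
        (PySem.List.pyRange 0 K).foldl (fun acc k =>
          acc + pv_addr_cost (base + i * K + k) * C1 * C2 * C3 * C4) acc) 0
      = pv_region_cost base (if 0 < I ∧ 0 < K then I * K else 0) * C1 * C2 * C3 * C4 := by
  simp only [mul_assoc]
  exact pv_region_eq base (C1 * (C2 * (C3 * C4))) I K hb

lemma pv_region_eq3 (base C1 C2 C3 : Int) (I K : Int) (hb : 0 < I → 0 < K → 1 ≤ base) :
    (PySem.List.pyRange 0 I).foldl (fun acc i =>
        (PySem.List.pyRange 0 K).foldl (fun acc k =>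
          acc + pv_addr_cost (base + i * K + k) * C1 * C2 * C3) acc) 0
      = pv_region_cost base (if 0 < I ∧ 0 < K then I * K else 0) * C1 * C2 * C3 := by
  simp only [mul_assoc]
  exact pv_region_eq base (C1 * (C2 * C3)) I K hb

lemma pv_addr_cost_one : pv_addr_cost 1 = 1 := by decide

-- ===== VERDICT (by name: the statement is the Claim_ definition above) =====
theorem analyze_config_spec : Claim_equal_analyze_config := by
  intro Ti Tj Tk _ hpre
  obtain ⟨hTi, hTj, hTk, hB, hC⟩ := hpre
  unfold Spec_analyze_config
  simp only [analyze_config, analyze_config_alt]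
  rw [pv_region_eq4 2 Tj (PySem.Int.floordiv 16 Ti) (PySem.Int.floordiv 16 Tj)
        (PySem.Int.floordiv 16 Tk) Ti Tk (fun _ _ => by norm_num)]
  rw [pv_region_eq4 (2 + Ti * Tk) Ti (PySem.Int.floordiv 16 Ti) (PySem.Int.floordiv 16 Tj)
        (PySem.Int.floordiv 16 Tk) Tk Tj hB]
  rw [pv_region_eq3 (2 + Ti * Tk + Tk * Tj) ((PySem.Int.floordiv 16 Tk * Tk - 1) + 1)
        (PySem.Int.floordiv 16 Ti) (PySem.Int.floordiv 16 Tj) Ti Tj hC]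
  rw [pv_addr_cost_one, sub_add_cancel, one_mul]
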